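-- pv_equiv track=rewrite | github.com/Kadaverciant/RL_for_keyboard_layout | src/keyboard.py | encode_decode_buttons
-- ===== SOURCE A (Python) =====
-- def encode_decode_buttons(buttons: set[str]) -> tuple[dict[str, int], dict[int, str]]:
--     letters_dict = {}
--     for idx, letter in enumerate("abcdefghijklmnopqrstuvwxyz"):
--         letters_dict[letter] = idx + 1
--
--     offset = len(letters_dict)
--     for idx, letter in enumerate("abcdefghijklmnopqrstuvwxyz".upper()):
--         letters_dict[letter] = offset + idx + 1
--
--     encode_value = len(letters_dict) + 1
--     encode_dict = {}
--     decode_dict = {}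
--     for btn in sorted(buttons):
--         if btn in letters_dict:
--             decode_dict[letters_dict[btn]] = btn
--             encode_dict[btn] = letters_dict[btn]
--         else:
--             decode_dict[encode_value] = btn
--             encode_dict[btn] = encode_value
--             encode_value += 1
--     return encode_dict, decode_dict
-- ===== SOURCE B (Python) =====
-- def encode_decode_buttons(buttons: set[str]) -> tuple[dict[str, int], dict[int, str]]:
--     def is_letter(b):
--         return len(b) == 1 and ('a' <= b <= 'z' or 'A' <= b <= 'Z')
--
--     def code(b):
--         if is_letter(b):
--             o = ord(b)
--             return o - 96 if o >= 97 else o - 38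
--         return 53 + sum(1 for x in buttons if not is_letter(x) and x < b)
--
--     s = sorted(buttons)
--     encode_dict = {b: code(b) for b in s}
--     decode_dict = {code(b): b for b in s}
--     return encode_dict, decode_dict
-- ===== Notes on version B (the rewrite author's own statement) =====
-- stated objective: alternative
-- what changed: A builds a 52-entry letter table and threads a mutable counter through one branching pass over the sorted buttons; B uses no table and no counter: each button's code is computed independently and order-free -- ord() arithmetic for single letters, and 53 plus the count of strictly smaller non-letter buttons otherwise -- and both dicts are built by comprehensions over the sorted buttons.
import Mathlib
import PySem

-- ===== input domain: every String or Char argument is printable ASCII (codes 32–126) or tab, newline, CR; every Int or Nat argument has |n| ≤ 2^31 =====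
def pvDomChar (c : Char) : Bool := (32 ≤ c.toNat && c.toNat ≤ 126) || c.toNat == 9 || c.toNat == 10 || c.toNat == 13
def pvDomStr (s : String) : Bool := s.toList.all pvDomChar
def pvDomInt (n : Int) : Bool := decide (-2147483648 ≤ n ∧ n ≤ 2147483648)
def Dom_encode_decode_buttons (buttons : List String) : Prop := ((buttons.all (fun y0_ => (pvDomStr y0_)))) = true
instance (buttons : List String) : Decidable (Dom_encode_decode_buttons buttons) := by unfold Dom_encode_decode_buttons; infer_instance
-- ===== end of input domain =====

-- B drops A's 52-entry letter table and its running counter: a button's code is computed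
-- independently by ord() arithmetic (letters) or by counting strictly smaller non-letter
-- buttons (others); objective: alternative (same result, order-free per-element codes).

-- ===== PORT A =====
def pvLowers : String := "abcdefghijklmnopqrstuvwxyz"

-- letters_dict, built exactly as A builds it: two enumerate loops, the second offset by len
def lettersDictA : PySem.Dict String Int :=
  let d1 := (PySem.List.enumerate pvLowers.toList).foldl
    (fun d p => d.insert (String.ofList [p.2]) (p.1 + 1)) PySem.Dict.empty
  let offset : Int := (PySem.Dict.size d1 : Int)
  (PySem.List.enumerate (PySem.Str.upper pvLowers).toList).foldl
    (fun d p => d.insert (String.ofList [p.2]) (offset + p.1 + 1)) d1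

-- letters_dict[btn] is only evaluated under 'btn in letters_dict', so getD _ 0 is exact there
def encode_decode_buttons (buttons : List String) : (List (String × Int)) × (List (Int × String)) :=
  let letters_dict := lettersDictA
  let encode_value : Int := (PySem.Dict.size letters_dict : Int) + 1
  let st := (PySem.List.sorted buttons (fun x => x) false).foldl
    (fun (st : PySem.Dict String Int × PySem.Dict Int String × Int) btn =>
      if letters_dict.contains btn then
        (st.1.insert btn (letters_dict.getD btn 0),
         (st.2.1).insert (letters_dict.getD btn 0) btn,
         st.2.2)
      else
        (st.1.insert btn st.2.2, (st.2.1).insert st.2.2 btn, st.2.2 + 1))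
    (PySem.Dict.empty, PySem.Dict.empty, encode_value)
  (st.1.items, st.2.1.items)

-- ===== PORT B =====
-- is_letter: len(b)==1 and ('a'<=b<='z' or 'A'<=b<='Z'); for a single-char string Python's
-- string comparison is exactly the comparison of its one code point, so the match is exact
def isLetterB (b : String) : Bool :=
  match b.toList with
  | [c] => ('a' ≤ c && c ≤ 'z') || ('A' ≤ c && c ≤ 'Z')
  | _ => false

-- code(b); ord(b) is only evaluated when is_letter(b) holds, so b has exactly one char there
def codeB (buttons : List String) (b : String) : Int :=
  if isLetterB b then
    match b.toList with
    | [c] => if (c.toNat : Int) ≥ 97 then (c.toNat : Int) - 96 else (c.toNat : Int) - 38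
    | _ => 0  -- unreachable under isLetterB
  else
    53 + ((buttons.filter (fun x => !(isLetterB x) && decide (x < b))).length : Int)

def encode_decode_buttons_alt (buttons : List String) : (List (String × Int)) × (List (Int × String)) :=
  let s := PySem.List.sorted buttons (fun x => x) false
  let enc : PySem.Dict String Int := PySem.Dict.ofList (s.map (fun b => (b, codeB buttons b)))
  let dec : PySem.Dict Int String := PySem.Dict.ofList (s.map (fun b => (codeB buttons b, b)))
  (enc.items, dec.items)

-- ===== PRECONDITION & SPEC =====
-- Pre_ excludes lists with duplicate elements: the Python parameter is a set, represented here
-- (per the type convention) as a list of its DISTINCT elements, so a duplicated list never arises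
-- from a set; on such raw lists A's decode dict keeps stale counter entries for each repetition.
def Pre_encode_decode_buttons (buttons : List String) : Prop := buttons.Nodup
instance (buttons : List String) : Decidable (Pre_encode_decode_buttons buttons) := by unfold Pre_encode_decode_buttons; infer_instance
def pvWitness_encode_decode_buttons : List String := ["b", "!", "Z", "aa"]
def Spec_encode_decode_buttons (buttons : List String) (out : (List (String × Int)) × (List (Int × String))) : Prop := out = encode_decode_buttons_alt buttons
instance (buttons : List String) (out : (List (String × Int)) × (List (Int × String))) : Decidable (Spec_encode_decode_buttons buttons out) := by unfold Spec_encode_decode_buttons; infer_instance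

-- ===== CLAIM (what is proved, stated in full; the proofs are below) =====
def Claim_equal_encode_decode_buttons : Prop := ∀ (buttons : List String), Dom_encode_decode_buttons buttons → Pre_encode_decode_buttons buttons → Spec_encode_decode_buttons buttons (encode_decode_buttons buttons)

-- ===== LEMMAS AND PROOFS =====

-- two chars with the same code point are equal
theorem charEq {c d : Char} (h : c.toNat = d.toNat) : c = d := Char.ext (UInt32.toNat_inj.mp h)

-- proof-side copy of A's letter table as a literal ofList (the ports never use it)
def tableP : PySem.Dict String Int := PySem.Dict.mk [("a", 1), ("b", 2), ("c", 3), ("d", 4), ("e", 5), ("f", 6), ("g", 7), ("h", 8), ("i", 9), ("j", 10), ("k", 11), ("l", 12), ("m", 13), ("n", 14), ("o", 15), ("p", 16), ("q", 17), ("r", 18), ("s", 19), ("t", 20), ("u", 21), ("v", 22), ("w", 23), ("x", 24), ("y", 25), ("z", 26), ("A", 27), ("B", 28), ("C", 29), ("D", 30), ("E", 31), ("F", 32), ("G", 33), ("H", 34), ("I", 35), ("J", 36), ("K", 37), ("L", 38), ("M", 39), ("N", 40), ("O", 41), ("P", 42), ("Q", 43), ("R", 44), ("S", 45), ("T", 46),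 ("U", 47), ("V", 48), ("W", 49), ("X", 50), ("Y", 51), ("Z", 52)]

set_option maxRecDepth 8192 in
theorem tableA_eq_tableP : lettersDictA = tableP := by decide

-- the 52 letter chars, in A's table order
def pvAllLetters : List Char := "abcdefghijklmnopqrstuvwxyzABCDEFGHIJKLMNOPQRSTUVWXYZ".toList

set_option maxRecDepth 8192 in
theorem toNat_pvAllLetters : pvAllLetters.map Char.toNat
    = (List.range 26).map (fun i => 97 + i) ++ (List.range 26).map (fun i => 65 + i) := by decide

theorem isLetter_single : ∀ c ∈ pvAllLetters,
    (('a' ≤ c && c ≤ 'z') || ('A' ≤ c && c ≤ 'Z')) = true :=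
  List.all_eq_true.mp (by decide)

-- isLetterB characterised: the single char is one of the 52 letters
theorem isLetterB_iff (b : String) :
    isLetterB b = true ↔ ∃ c, b.toList = [c] ∧ c ∈ pvAllLetters := by
  constructor
  · intro h
    unfold isLetterB at h
    match hb : b.toList with
    | [c] =>
      refine ⟨c, rfl, ?_⟩
      rw [hb] at h
      simp only [Char.le_def, Bool.or_eq_true, Bool.and_eq_true, decide_eq_true_eq,
        UInt32.le_iff_toNat_le] at h
      have e1 : ('a').val.toNat = 97 := rfl
      have e2 : ('z').val.toNat = 122 := rfl
      have e3 : ('A').val.toNat = 65 := rfl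
      have e4 : ('Z').val.toNat = 90 := rfl
      have e5 : c.toNat = c.val.toNat := rfl
      have hmem : c.toNat ∈ pvAllLetters.map Char.toNat := by
        rw [toNat_pvAllLetters]
        rcases h with h | h
        · exact List.mem_append_left _ (List.mem_map.2 ⟨c.toNat - 97, List.mem_range.2 (by omega), by omega⟩)
        · exact List.mem_append_right _ (List.mem_map.2 ⟨c.toNat - 65, List.mem_range.2 (by omega), by omega⟩)
      rcases List.mem_map.1 hmem with ⟨d, hd, he⟩
      exact (charEq he.symm) ▸ hd
    | [] => rw [hb] at h; exact absurd h (by simp)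
    | c :: d :: t => rw [hb] at h; exact absurd h (by simp)
  · rintro ⟨c, hb, hc⟩
    unfold isLetterB
    rw [hb]
    exact isLetter_single c hc

theorem letters_contains_of_mem : ∀ c ∈ pvAllLetters, tableP.contains (String.ofList [c]) = true :=
  List.all_eq_true.mp (by decide)

theorem letters_getD_of_mem : ∀ c ∈ pvAllLetters,
    tableP.getD (String.ofList [c]) 0
      = if (c.toNat : Int) ≥ 97 then (c.toNat : Int) - 96 else (c.toNat : Int) - 38 := by
  have h : pvAllLetters.all (fun c => decide (tableP.getD (String.ofList [c]) 0
      = if (c.toNat : Int) ≥ 97 then (c.toNat : Int) - 96 else (c.toNat : Int) - 38)) = true := by decide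
  intro c hc
  exact of_decide_eq_true (List.all_eq_true.mp h c hc)

theorem letters_keys_isLetter : ∀ k ∈ tableP.keys, isLetterB k = true :=
  List.all_eq_true.mp (by decide)

theorem contains_eq_isLetterB (b : String) : tableP.contains b = isLetterB b := by
  by_cases h : isLetterB b = true
  · rcases (isLetterB_iff b).1 h with ⟨c, hb, hc⟩
    rw [h]
    have : String.ofList [c] = b := by rw [← hb, String.ofList_toList]
    exact this ▸ letters_contains_of_mem c hc
  · rw [Bool.not_eq_true] at h
    rw [h]
    by_contra hcon
    rw [Bool.not_eq_false, PySem.Dict.contains_eq_isSome_get?] at hcon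
    rcases Option.isSome_iff_exists.1 hcon with ⟨v, hv⟩
    have hm := PySem.Dict.mem_items_of_get?_eq_some _ hv
    have hk : b ∈ tableP.keys := by
      simp only [PySem.Dict.keys]
      exact List.mem_map.2 ⟨(b, v), hm, rfl⟩
    exact absurd (letters_keys_isLetter b hk) (by simp [h])

theorem getD_eq_ordCode {b : String} (h : isLetterB b = true) :
    tableP.getD b 0
      = match b.toList with
        | [c] => if (c.toNat : Int) ≥ 97 then (c.toNat : Int) - 96 else (c.toNat : Int) - 38
        | _ => (0 : Int) := by
  rcases (isLetterB_iff b).1 h with ⟨c, hb, hc⟩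
  have hob : String.ofList [c] = b := by rw [← hb, String.ofList_toList]
  rw [hb, ← hob, letters_getD_of_mem c hc]

-- the code list: what A's fold appends, with the running counter made explicit
def codeL : List String → Int → List (String × Int)
  | [], _ => []
  | b :: t, v =>
    if tableP.contains b then (b, tableP.getD b 0) :: codeL t v
    else (b, v) :: codeL t (v + 1)

theorem map_fst_codeL (l : List String) (v : Int) : (codeL l v).map Prod.fst = l := by
  induction l generalizing v with
  | nil => rfl
  | cons b t ih => by_cases h : tableP.contains b <;> simp [codeL, h, ih]

-- in a list with pairwise-distinct second components, entries with equal snd are equal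
theorem snd_nodup_inj {α β : Type} (l : List (α × β)) (h : (l.map Prod.snd).Nodup)
    {p q : α × β} (hp : p ∈ l) (hq : q ∈ l) (h2 : p.2 = q.2) : p = q := by
  induction l with
  | nil => cases hp
  | cons x t ih =>
    simp only [List.map_cons, List.nodup_cons] at h
    rcases List.mem_cons.1 hp with rfl | hp' <;> rcases List.mem_cons.1 hq with rfl | hq'
    · rfl
    · exact absurd (h2 ▸ List.mem_map_of_mem hq') h.1
    · exact absurd (h2 ▸ List.mem_map_of_mem hp') h.1
    · exact ih h.2 hp' hq'

set_option maxRecDepth 8192 in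
theorem values_tableP_nodup : (tableP.items.map Prod.snd).Nodup := by decide

-- the letter lookup is injective on letters
theorem tableP_getD_inj {b b' : String} (hb : tableP.contains b = true)
    (hb' : tableP.contains b' = true)
    (h : tableP.getD b 0 = tableP.getD b' 0) : b = b' := by
  rw [PySem.Dict.contains_eq_isSome_get?] at hb hb'
  rcases Option.isSome_iff_exists.1 hb with ⟨v, hv⟩
  rcases Option.isSome_iff_exists.1 hb' with ⟨v', hv'⟩
  rw [PySem.Dict.getD_eq_get?_getD, PySem.Dict.getD_eq_get?_getD, hv, hv'] at h
  simp only [Option.getD_some] at h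
  subst h
  have m1 := PySem.Dict.mem_items_of_get?_eq_some _ hv
  have m2 := PySem.Dict.mem_items_of_get?_eq_some _ hv'
  have := snd_nodup_inj tableP.items values_tableP_nodup m1 m2 rfl
  exact congrArg Prod.fst this

theorem tableP_values_bounds : ∀ p ∈ tableP.items, 1 ≤ p.2 ∧ p.2 ≤ 52 := by
  have h : tableP.items.all (fun p => decide (1 ≤ p.2 ∧ p.2 ≤ 52)) = true := by decide
  intro p hp
  exact of_decide_eq_true (List.all_eq_true.mp h p hp)

theorem tableP_getD_bounds {b : String} (hb : tableP.contains b = true) :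
    1 ≤ tableP.getD b 0 ∧ tableP.getD b 0 ≤ 52 := by
  rw [PySem.Dict.contains_eq_isSome_get?] at hb
  rcases Option.isSome_iff_exists.1 hb with ⟨v, hv⟩
  have m := PySem.Dict.mem_items_of_get?_eq_some _ hv
  rw [PySem.Dict.getD_eq_get?_getD, hv, Option.getD_some]
  exact tableP_values_bounds _ m

-- every code in codeL l v is a letter code in [1,52] or a counter code in [v, v + #nonletters)
theorem codeL_codes (l : List String) (v : Int) :
    ∀ p ∈ codeL l v,
      (tableP.contains p.1 = true ∧ p.2 = tableP.getD p.1 0 ∧ 1 ≤ p.2 ∧ p.2 ≤ 52) ∨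
      (tableP.contains p.1 = false ∧ v ≤ p.2 ∧
        p.2 < v + ((l.filter (fun b => !(tableP.contains b))).length : Int)) := by
  induction l generalizing v with
  | nil => intro p hp; cases hp
  | cons b t ih =>
    intro p hp
    by_cases h : tableP.contains b
    · rw [codeL, if_pos h] at hp
      rcases List.mem_cons.1 hp with rfl | hp'
      · exact Or.inl ⟨h, rfl, tableP_getD_bounds h⟩
      · rcases ih v p hp' with h1 | ⟨h2a, h2b, h2c⟩
        · exact Or.inl h1
        · refine Or.inr ⟨h2a, h2b, ?_⟩
          simpa [h] using h2c
    · rw [codeL, if_neg h] at hp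
      have hfl : ((b :: t).filter (fun b => !(tableP.contains b))).length
          = (t.filter (fun b => !(tableP.contains b))).length + 1 := by
        simp [h]
      rcases List.mem_cons.1 hp with rfl | hp'
      · refine Or.inr ⟨by simpa using h, le_refl _, ?_⟩
        rw [hfl]; push_cast
        have : (0:Int) ≤ ((t.filter (fun b => !(tableP.contains b))).length : Int) := by positivity
        omega
      · rcases ih (v + 1) p hp' with h1 | ⟨h2a, h2b, h2c⟩
        · exact Or.inl h1
        · refine Or.inr ⟨h2a, by omega, ?_⟩
          rw [hfl]; push_cast; omega

theorem codeL_snd_nodup (l : List String) (v : Int) (hl : l.Nodup) (hv : 52 < v) :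
    ((codeL l v).map Prod.snd).Nodup := by
  induction l generalizing v with
  | nil => simp [codeL]
  | cons b t ih =>
    rcases List.nodup_cons.1 hl with ⟨hb, ht⟩
    by_cases h : tableP.contains b
    · rw [codeL, if_pos h]
      simp only [List.map_cons, List.nodup_cons]
      refine ⟨?_, ih v ht hv⟩
      intro hmem
      rcases List.mem_map.1 hmem with ⟨p, hp, hps⟩
      rcases codeL_codes t v p hp with ⟨h1a, h1b, _⟩ | ⟨_, h2b, _⟩
      · have hbp : b = p.1 := tableP_getD_inj h h1a (hps.symm.trans h1b)
        have hp1 : p.1 ∈ t := by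
          have := List.mem_map_of_mem (f := Prod.fst) hp
          rwa [map_fst_codeL] at this
        exact hb (hbp ▸ hp1)
      · have := (tableP_getD_bounds h).2; omega
    · rw [codeL, if_neg h]
      simp only [List.map_cons, List.nodup_cons]
      refine ⟨?_, ih (v + 1) ht (by omega)⟩
      intro hmem
      rcases List.mem_map.1 hmem with ⟨p, hp, hps⟩
      rcases codeL_codes t (v + 1) p hp with ⟨_, _, _, h1c⟩ | ⟨_, h2b, _⟩ <;> omega

-- characterisation of A's main fold
theorem foldA_items (l : List String) (e : PySem.Dict String Int) (d : PySem.Dict Int String)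
    (v : Int) (hl : l.Nodup) (hv : 52 < v)
    (he : ∀ b ∈ l, e.contains b = false)
    (hd : ∀ p ∈ codeL l v, d.contains p.2 = false) :
    (l.foldl
      (fun (st : PySem.Dict String Int × PySem.Dict Int String × Int) btn =>
        if tableP.contains btn then
          (st.1.insert btn (tableP.getD btn 0),
           (st.2.1).insert (tableP.getD btn 0) btn, st.2.2)
        else (st.1.insert btn st.2.2, (st.2.1).insert st.2.2 btn, st.2.2 + 1))
      (e, d, v)).1.items = e.items ++ codeL l v ∧
    (l.foldl
      (fun (st : PySem.Dict String Int × PySem.Dict Int String × Int) btn =>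
        if tableP.contains btn then
          (st.1.insert btn (tableP.getD btn 0),
           (st.2.1).insert (tableP.getD btn 0) btn, st.2.2)
        else (st.1.insert btn st.2.2, (st.2.1).insert st.2.2 btn, st.2.2 + 1))
      (e, d, v)).2.1.items = d.items ++ (codeL l v).map (fun p => (p.2, p.1)) := by
  induction l generalizing e d v with
  | nil => simp [codeL]
  | cons b t ih =>
    rcases List.nodup_cons.1 hl with ⟨hbt, ht⟩
    by_cases h : tableP.contains b
    · simp only [List.foldl_cons, if_pos h]
      have hcd : codeL (b :: t) v = (b, tableP.getD b 0) :: codeL t v := by rw [codeL, if_pos h]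
      have he' : ∀ b' ∈ t, (e.insert b (tableP.getD b 0)).contains b' = false := by
        intro b' hb'
        rw [PySem.Dict.contains_insert]
        have : (b' == b) = false := beq_false_of_ne (fun heq => hbt (heq ▸ hb'))
        simp [this, he b' (List.mem_cons_of_mem _ hb')]
      have hd' : ∀ p ∈ codeL t v, (d.insert (tableP.getD b 0) b).contains p.2 = false := by
        intro p hp
        rw [PySem.Dict.contains_insert]
        have hne : p.2 ≠ tableP.getD b 0 := by
          intro hpe
          have hnd := codeL_snd_nodup (b :: t) v hl hv
          rw [hcd] at hnd
          simp only [List.map_cons, List.nodup_cons] at hnd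
          exact hnd.1 (hpe ▸ List.mem_map_of_mem hp)
        simp [beq_false_of_ne hne, hd p (by rw [hcd]; exact List.mem_cons_of_mem _ hp)]
      have hih := ih (e.insert b (tableP.getD b 0)) (d.insert (tableP.getD b 0) b) v ht hv he' hd'
      refine ⟨?_, ?_⟩
      · rw [hih.1, hcd,
          PySem.Dict.items_insert_of_not_contains e _ (he b List.mem_cons_self)]
        simp
      · have hdc : d.contains (tableP.getD b 0) = false :=
          hd (b, tableP.getD b 0) (by rw [hcd]; exact List.mem_cons_self)
        rw [hih.2, hcd, PySem.Dict.items_insert_of_not_contains d b hdc]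
        simp
    · simp only [List.foldl_cons, if_neg h]
      have hcd : codeL (b :: t) v = (b, v) :: codeL t (v + 1) := by rw [codeL, if_neg h]
      have he' : ∀ b' ∈ t, (e.insert b v).contains b' = false := by
        intro b' hb'
        rw [PySem.Dict.contains_insert]
        have : (b' == b) = false := beq_false_of_ne (fun hb => hbt (hb ▸ hb'))
        simp [this, he b' (List.mem_cons_of_mem _ hb')]
      have hd' : ∀ p ∈ codeL t (v + 1), (d.insert v b).contains p.2 = false := by
        intro p hp
        rw [PySem.Dict.contains_insert]
        have hne : p.2 ≠ v := by
          rcases codeL_codes t (v + 1) p hp with ⟨_, _, _, h1c⟩ | ⟨_, h2b, _⟩ <;> omega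
        simp [beq_false_of_ne hne, hd p (by rw [hcd]; exact List.mem_cons_of_mem _ hp)]
      have hih := ih (e.insert b v) (d.insert v b) (v + 1) ht (by omega) he' hd'
      refine ⟨?_, ?_⟩
      · rw [hih.1, hcd,
          PySem.Dict.items_insert_of_not_contains e _ (he b List.mem_cons_self)]
        simp
      · have hdc : d.contains v = false :=
          hd (b, v) (by rw [hcd]; exact List.mem_cons_self)
        rw [hih.2, hcd, PySem.Dict.items_insert_of_not_contains d b hdc]
        simp

-- B side: an ofList over distinct keys is just that list of items
theorem items_ofList_of_nodup {κ ν : Type} [BEq κ] [LawfulBEq κ] (ps : List (κ × ν))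
    (h : (ps.map Prod.fst).Nodup) : (PySem.Dict.ofList ps).items = ps := by
  have := PySem.Dict.items_foldl_insert_fresh ps Prod.fst Prod.snd PySem.Dict.empty
    (fun a _ => by simp [pysem]) h
  simpa [PySem.Dict.ofList, PySem.Dict.update] using this

-- in a strictly increasing list, the position of b is the number of elements below b
theorem idxOf_eq_length_filter_lt (o : List String) (ho : o.Pairwise (· < ·))
    (b : String) (hb : b ∈ o) :
    (o.idxOf b : Int) = ((o.filter (fun x => decide (x < b))).length : Int) := by
  induction o with
  | nil => cases hb
  | cons a t ih =>
    rcases List.pairwise_cons.1 ho with ⟨hht, ht⟩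
    rcases List.mem_cons.1 hb with rfl | hb'
    · rw [List.idxOf_cons_self]
      have hnil : (b :: t).filter (fun x => decide (x < b)) = [] := by
        rw [List.filter_eq_nil_iff]
        intro x hx
        rcases List.mem_cons.1 hx with rfl | hx'
        · simp
        · simp only [decide_eq_true_eq]
          exact fun hlt => absurd (lt_trans (hht x hx') hlt) (lt_irrefl b)
      rw [hnil]; rfl
    · have hhb : a < b := hht b hb'
      rw [List.idxOf_cons_ne _ (ne_of_lt hhb),
        List.filter_cons_of_pos (by simp only [decide_eq_true_eq]; exact hhb)]
      simp only [List.length_cons, Nat.succ_eq_add_one]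
      have hih := ih ht hb'
      omega

-- codeL in terms of positions among the non-letters
theorem codeL_eq_map (l : List String) (v : Int) (hl : l.Nodup) :
    codeL l v = l.map (fun b =>
      (b, if tableP.contains b then tableP.getD b 0
          else v + ((l.filter (fun b => !(tableP.contains b))).idxOf b : Int))) := by
  induction l generalizing v with
  | nil => rfl
  | cons b t ih =>
    rcases List.nodup_cons.1 hl with ⟨hbt, ht⟩
    by_cases h : tableP.contains b
    · rw [codeL, if_pos h, ih v ht]
      have hfe : (b :: t).filter (fun b => !(tableP.contains b))
          = t.filter (fun b => !(tableP.contains b)) := by simp [h]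
      simp only [List.map_cons, if_pos h, hfe]
    · rw [codeL, if_neg h, ih (v + 1) ht]
      have hfe : (b :: t).filter (fun b => !(tableP.contains b))
          = b :: t.filter (fun b => !(tableP.contains b)) := by simp [h]
      simp only [List.map_cons, if_neg h, hfe]
      refine List.cons_eq_cons.mpr ⟨?_, ?_⟩
      · simp
      · apply List.map_congr_left
        intro b' hb'
        by_cases h' : tableP.contains b'
        · simp [h']
        · have hne : b' ≠ b := fun hbe => hbt (hbe ▸ hb')
          rw [if_neg (by simp [h']), if_neg (by simp [h']), List.idxOf_cons_ne _ (by exact hne.symm)]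
          push_cast; ring_nf

-- ===== VERDICT (by name: the statement is the Claim_ definition above) =====
set_option maxRecDepth 8192 in
theorem encode_decode_buttons_spec : Claim_equal_encode_decode_buttons := by
  intro buttons _ hpre
  unfold Spec_encode_decode_buttons encode_decode_buttons encode_decode_buttons_alt
  rw [tableA_eq_tableP]
  have hs : (PySem.List.sorted buttons (fun x => x) false).Nodup :=
    (PySem.List.sorted_perm buttons (fun x => x) false).nodup_iff.2 hpre
  set s := PySem.List.sorted buttons (fun x => x) false with hsdef
  have hV : ((PySem.Dict.size tableP : Int) + 1) = 53 := by decide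
  have hfold := foldA_items s PySem.Dict.empty PySem.Dict.empty ((PySem.Dict.size tableP : Int) + 1)
    hs (by rw [hV]; omega) (fun b _ => by simp [pysem]) (fun p _ => by simp [pysem])
  -- the strictly increasing order of the sorted non-letters
  have hslt : s.Pairwise (· < ·) := by
    have hle : s.Pairwise (fun a b => a ≤ b) := PySem.List.sorted_pairwise buttons (fun x => x)
    exact (List.Pairwise.and hle hs).imp (fun ⟨h1, h2⟩ => lt_of_le_of_ne h1 h2)
  set others := s.filter (fun b => !(tableP.contains b)) with hodef
  have holt : others.Pairwise (· < ·) := hslt.filter _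
  -- the two per-element code formulas agree
  have hmapeq : s.map (fun b => (b, codeB buttons b))
      = codeL s ((PySem.Dict.size tableP : Int) + 1) := by
    rw [codeL_eq_map s _ hs]
    apply List.map_congr_left
    intro b hb
    by_cases h : isLetterB b
    · rw [contains_eq_isLetterB, if_pos h]
      unfold codeB
      rw [if_pos h, getD_eq_ordCode h]
    · rw [contains_eq_isLetterB, if_neg (by simp [h])]
      unfold codeB
      rw [if_neg (by simp [h]), hV]
      have hbo : b ∈ others := by
        rw [hodef]
        simp [List.mem_filter, hb, contains_eq_isLetterB, h]
      rw [← hodef, idxOf_eq_length_filter_lt others holt b hbo]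
      -- count the same set of strings on both sides
      have hcnt : others.filter (fun x => decide (x < b))
          = s.filter (fun x => !(isLetterB x) && decide (x < b)) := by
        rw [hodef, List.filter_filter]
        apply List.filter_congr
        intro x _
        rw [contains_eq_isLetterB, Bool.and_comm]
      have hperm : (buttons.filter (fun x => !(isLetterB x) && decide (x < b))).length
          = (s.filter (fun x => !(isLetterB x) && decide (x < b))).length :=
        ((PySem.List.sorted_perm buttons (fun x => x) false).filter _).length_eq.symm
      rw [hcnt, hperm]
  -- B's enc items
  have henckeys : ((s.map (fun b => (b, codeB buttons b))).map Prod.fst) = s := by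
    simp [Function.comp_def]
  have henc := items_ofList_of_nodup (s.map (fun b => (b, codeB buttons b)))
    (by rw [henckeys]; exact hs)
  -- B's dec items: keys are the codes, which are nodup
  have hdeckeys : ((s.map (fun b => (codeB buttons b, b))).map Prod.fst)
      = (codeL s ((PySem.Dict.size tableP : Int) + 1)).map Prod.snd := by
    rw [← hmapeq]; simp [Function.comp_def]
  have hdec := items_ofList_of_nodup (s.map (fun b => (codeB buttons b, b)))
    (by rw [hdeckeys]; exact codeL_snd_nodup s _ hs (by rw [hV]; omega))
  have hswap : s.map (fun b => (codeB buttons b, b))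
      = (codeL s ((PySem.Dict.size tableP : Int) + 1)).map (fun p => (p.2, p.1)) := by
    rw [← hmapeq]; simp [Function.comp_def]
  simp only []
  rw [hfold.1, hfold.2, henc, hmapeq, hdec, hswap]
  simp [pysem]
  exact ⟨rfl, rfl⟩
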